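-- pv_equiv track=rewrite | github.com/ltouroumov/worm-cyoa-v6-fork | cyoa/tools/layout.py | distribute_objects
-- ===== SOURCE A (Python) =====
-- from bisect import bisect_right
--
-- LINE_TOTAL = 300
--
-- def parse_col_width(col_class):
--   """Parse a width class to normalized grid units (out of LINE_TOTAL).
--
--   Supports Bootstrap col-* classes (12-column grid) and w-* classes
--   (percentage widths). Returns LINE_TOTAL (full width) for empty or
--   unparseable values.
--   """
--   if not col_class:
--     return LINE_TOTAL
--   try:
--     if col_class.startswith("w-"):
--       pct = int(col_class.split("-")[1])
--       return pct * LINE_TOTAL // 100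
--     return int(col_class.rsplit("-", 1)[-1]) * LINE_TOTAL // 12
--   except (ValueError, IndexError):
--     return LINE_TOTAL
--
-- def effective_obj_width(obj, row_default_width):
--   """Get an object's effective grid width, falling back to the row default."""
--   obj_width = obj.get("objectWidth", "")
--   if obj_width:
--     return parse_col_width(obj_width)
--   return parse_col_width(row_default_width)
--
-- def compute_line_boundaries(objects, row_default_width):
--   """Return sorted list of object indices that start a new visual line.
--
--   Index 0 is always included. An index i means that object[i] is the first
--   object on a new visual line, so slicing before i produces complete lines.
--   """
--   boundaries = [0]
--   line_used = 0
--   for i, obj in enumerate(objects):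
--     w = effective_obj_width(obj, row_default_width)
--     if line_used > 0 and line_used + w > LINE_TOTAL:
--       boundaries.append(i)
--       line_used = 0
--     line_used += w
--     if line_used >= LINE_TOTAL:
--       if i + 1 < len(objects):
--         boundaries.append(i + 1)
--       line_used = 0
--   return boundaries
--
-- def distribute_objects(objects, max_objects, row_default_width):
--   """Split a flat list of objects into pages of at most max_objects each.
--
--   Splits only at visual line boundaries so no page ends with an
--   incomplete grid line. Falls back to a hard split at max_objects if
--   no line boundary is found.
--   """
--   if len(objects) <= max_objects:
--     return [objects]
--
--   boundaries = compute_line_boundaries(objects, row_default_width)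
--   pages = []
--   start = 0
--
--   while start < len(objects):
--     if len(objects) - start <= max_objects:
--       pages.append(objects[start:])
--       break
--
--     target = start + max_objects
--     # Find the largest boundary that is <= target and > start
--     idx = bisect_right(boundaries, target)
--     split_at = start
--     for j in range(idx - 1, -1, -1):
--       if boundaries[j] > start:
--         split_at = boundaries[j]
--         break
--
--     if split_at == start:
--       split_at = target  # no line boundary found, force split
--
--     pages.append(objects[start:split_at])
--     start = split_at
--
--   return pages
-- ===== SOURCE B (Python) =====
-- LINE_TOTAL = 300
--
-- def _width(col_class):
--   """Effective grid width of a width class (same parse rules, single function)."""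
--   if not col_class:
--     return LINE_TOTAL
--   if col_class.startswith("w-"):
--     seg = col_class.split("-")[1]
--     base = 100
--   else:
--     seg = col_class.rsplit("-", 1)[-1]
--     base = 12
--   try:
--     v = int(seg)
--   except ValueError:
--     return LINE_TOTAL
--   return v * LINE_TOTAL // base
--
-- def _advance(pages, start, cand, b, objects, max_objects):
--   """A new visual line starts at index b: flush pages that are now full.
--
--   cand is the furthest line-start seen so far; flush greedily until b fits
--   within the current page's capacity, then b becomes the new candidate."""
--   while b > start + max_objects:
--     cut = cand if cand > start else start + max_objects
--     pages.append(objects[start:cut])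
--     start = cut
--   return start, b
--
-- def distribute_objects(objects, max_objects, row_default_width):
--   """Split a flat list of objects into pages of at most max_objects each,
--   cutting only at visual line boundaries (hard cut when a line is too long),
--   in one streaming pass without materialising the boundary list."""
--   n = len(objects)
--   if n <= max_objects:
--     return [objects]
--   pages = []
--   start = 0   # first index of the page being built
--   cand = 0    # furthest line-start index seen so far
--   used = 0    # width consumed on the current visual line
--   for i, obj in enumerate(objects):
--     w = _width(obj.get("objectWidth", "") or row_default_width)
--     if used > 0 and used + w > LINE_TOTAL:
--       start, cand = _advance(pages, start, cand, i, objects, max_objects)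
--       used = 0
--     used += w
--     if used >= LINE_TOTAL:
--       if i + 1 < n:
--         start, cand = _advance(pages, start, cand, i + 1, objects, max_objects)
--       used = 0
--   while n - start > max_objects:
--     cut = cand if cand > start else start + max_objects
--     pages.append(objects[start:cut])
--     start = cut
--   pages.append(objects[start:])
--   return pages
-- ===== Notes on version B (the rewrite author's own statement) =====
-- stated objective: alternative
-- what changed: Replaces the build-the-full-boundary-list-then-while-loop-with-bisect_right-and-backward-scan approach by a single streaming pass over the objects that detects line starts on the fly and flushes pages greedily (tracking only the furthest line-start candidate), plus a trailing flush loop.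
-- outside the precondition, e.g. on distribute_objects([], -1, ''): A returns [], B does not finish within the time limit
import Mathlib
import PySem

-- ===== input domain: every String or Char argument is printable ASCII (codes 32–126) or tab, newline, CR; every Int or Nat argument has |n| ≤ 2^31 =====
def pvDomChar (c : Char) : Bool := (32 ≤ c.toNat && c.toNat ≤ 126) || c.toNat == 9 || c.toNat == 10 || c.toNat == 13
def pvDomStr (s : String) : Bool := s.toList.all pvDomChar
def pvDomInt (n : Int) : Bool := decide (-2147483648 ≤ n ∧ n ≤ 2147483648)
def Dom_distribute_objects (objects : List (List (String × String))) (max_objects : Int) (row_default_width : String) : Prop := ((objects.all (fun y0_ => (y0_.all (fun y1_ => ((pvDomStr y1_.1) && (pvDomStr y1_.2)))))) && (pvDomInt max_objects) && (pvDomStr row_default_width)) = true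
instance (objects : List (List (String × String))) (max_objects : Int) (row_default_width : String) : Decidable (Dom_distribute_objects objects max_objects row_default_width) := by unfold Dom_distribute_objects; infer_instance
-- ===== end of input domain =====

-- B is a single streaming pass (no boundary list, no bisect) proved equal to A's
-- build-boundaries-then-bisect pagination on all inputs admitted by Pre_.

-- ===== PORT A =====
def pvLineTotal : Int := 300   -- LINE_TOTAL

-- hand port (PySem has no rsplit): s.rsplit("-", 1)[-1] — the part after the LAST
-- "-", or s itself when "-" does not occur; exact for this call pattern
def pvRsplit1Last (s : String) : String :=
  let i := PySem.Str.rfind s "-"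
  if i < 0 then s else String.ofList (PySem.List.slice s.toList (some (i + 1)) none)

def parse_col_width (col_class : String) : Int :=
  if col_class = "" then pvLineTotal
  else if PySem.Str.startswith col_class "w-" then
    -- sep "-" ≠ "" so split? is always some
    match PySem.List.pyGet? ((PySem.Str.split? col_class "-").getD []) 1 with
    | none => pvLineTotal        -- IndexError caught
    | some seg =>
      match PySem.Int.ofStr? seg with
      | none => pvLineTotal      -- ValueError caught
      | some pct => PySem.Int.floordiv (pct * pvLineTotal) 100
  else
    match PySem.Int.ofStr? (pvRsplit1Last col_class) with
    | none => pvLineTotal        -- ValueError caught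
    | some v => PySem.Int.floordiv (v * pvLineTotal) 12

def effective_obj_width (obj : List (String × String)) (row_default_width : String) : Int :=
  let ow := PySem.Dict.getD (PySem.Dict.mk obj) "objectWidth" ""
  if ow = "" then parse_col_width row_default_width else parse_col_width ow

-- body of compute_line_boundaries' for-loop; state = (boundaries, line_used)
def pvStepBnd (n : Int) (row_default_width : String) (st : List Int × Int) (p : Int × List (String × String)) : List Int × Int :=
  let w := effective_obj_width p.2 row_default_width
  let st := if 0 < st.2 ∧ pvLineTotal < st.2 + w then (st.1 ++ [p.1], (0 : Int)) else st
  let used := st.2 + w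
  if pvLineTotal ≤ used then
    (if p.1 + 1 < n then st.1 ++ [p.1 + 1] else st.1, 0)
  else (st.1, used)

def compute_line_boundaries (objects : List (List (String × String))) (row_default_width : String) : List Int :=
  ((PySem.List.enumerate objects 0).foldl (pvStepBnd (PySem.List.len objects) row_default_width) ([0], 0)).1

-- 'for j in range(idx-1, -1, -1): if boundaries[j] > start: split_at = boundaries[j]; break'
-- called with k = idx; k+1 means current j = k
def pvScanBack (bs : List Int) (start : Int) : Nat → Int
  | 0 => start
  | k+1 =>
    match bs[k]? with
    | some b => if start < b then b else pvScanBack bs start k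
    | none => pvScanBack bs start k   -- unreachable: k < bisect_right ≤ len(bs)

-- A's while-loop; fuel only for totality (start strictly increases when 1 ≤ max_objects)
def pvLoopA (objects : List (List (String × String))) (m : Int) (bs : List Int) : Nat → Int → List (List (List (String × String)))
  | 0, _ => []
  | fuel+1, start =>
    if start < PySem.List.len objects then
      if PySem.List.len objects - start ≤ m then [PySem.List.slice objects (some start) none]
      else
        let target := start + m
        let idx := PySem.List.bisectRight bs target
        let s0 := pvScanBack bs start idx
        let split := if s0 = start then target else s0
        PySem.List.slice objects (some start) (some split) :: pvLoopA objects m bs fuel split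
    else []

def distribute_objects (objects : List (List (String × String))) (max_objects : Int) (row_default_width : String) : List (List (List (String × String))) :=
  if PySem.List.len objects ≤ max_objects then [objects]
  else pvLoopA objects max_objects (compute_line_boundaries objects row_default_width) (objects.length + 1) 0

-- ===== PORT B =====
def pvWidthB (col_class : String) : Int :=
  if col_class = "" then pvLineTotal
  else
    let pr : Option String × Int :=
      if PySem.Str.startswith col_class "w-" then
        (PySem.List.pyGet? ((PySem.Str.split? col_class "-").getD []) 1, 100)
      else (some (pvRsplit1Last col_class), 12)
    match pr.1 with
    | none => pvLineTotal   -- unreachable: a string starting with "w-" splits into ≥ 2 parts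
    | some seg =>
      match PySem.Int.ofStr? seg with
      | none => pvLineTotal -- ValueError caught
      | some v => PySem.Int.floordiv (v * pvLineTotal) pr.2

-- Source B's _advance; state = (pages, start, cand); fuel only for totality
def pvAdvance (objects : List (List (String × String))) (m : Int) : Nat → List (List (List (String × String))) × Int × Int → Int → List (List (List (String × String))) × Int × Int
  | 0, st, b => (st.1, st.2.1, b)
  | fuel+1, st, b =>
    if st.2.1 + m < b then
      let cut := if st.2.1 < st.2.2 then st.2.2 else st.2.1 + m
      pvAdvance objects m fuel (st.1 ++ [PySem.List.slice objects (some st.2.1) (some cut)], cut, st.2.2) b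
    else (st.1, st.2.1, b)

-- body of Source B's for-loop; state = ((pages, start, cand), used)
def pvStepB (objects : List (List (String × String))) (m : Int) (row_default_width : String) (st : (List (List (List (String × String))) × Int × Int) × Int) (p : Int × List (String × String)) : (List (List (List (String × String))) × Int × Int) × Int :=
  let ow := PySem.Dict.getD (PySem.Dict.mk p.2) "objectWidth" ""
  let w := pvWidthB (if ow = "" then row_default_width else ow)
  let gu := if 0 < st.2 ∧ pvLineTotal < st.2 + w then (pvAdvance objects m (objects.length + 1) st.1 p.1, (0 : Int)) else st
  let used := gu.2 + w
  if pvLineTotal ≤ used then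
    (if p.1 + 1 < PySem.List.len objects then pvAdvance objects m (objects.length + 1) gu.1 (p.1 + 1) else gu.1, 0)
  else (gu.1, used)

-- Source B's trailing while-loop; returns (pages, start); fuel only for totality
def pvFinish (objects : List (List (String × String))) (m : Int) : Nat → List (List (List (String × String))) × Int × Int → List (List (List (String × String))) × Int
  | 0, st => (st.1, st.2.1)
  | fuel+1, st =>
    if m < PySem.List.len objects - st.2.1 then
      let cut := if st.2.1 < st.2.2 then st.2.2 else st.2.1 + m
      pvFinish objects m fuel (st.1 ++ [PySem.List.slice objects (some st.2.1) (some cut)], cut, st.2.2)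
    else (st.1, st.2.1)

def distribute_objects_alt (objects : List (List (String × String))) (max_objects : Int) (row_default_width : String) : List (List (List (String × String))) :=
  if PySem.List.len objects ≤ max_objects then [objects]
  else
    let st := (PySem.List.enumerate objects 0).foldl (pvStepB objects max_objects row_default_width) (([], 0, 0), 0)
    let fin := pvFinish objects max_objects (objects.length + 1) st.1
    fin.1 ++ [PySem.List.slice objects (some fin.2) none]

-- ===== PRECONDITION & SPEC =====
-- Pre_ excludes max_objects ≤ 0 with more objects than max_objects: there A loops
-- forever, except for the accidental corner objects = [] with max_objects < 0 where
-- A returns [] while B's flush loop would not terminate.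
def Pre_distribute_objects (objects : List (List (String × String))) (max_objects : Int) (row_default_width : String) : Prop :=
  PySem.List.len objects ≤ max_objects ∨ 1 ≤ max_objects

instance (objects : List (List (String × String))) (max_objects : Int) (row_default_width : String) : Decidable (Pre_distribute_objects objects max_objects row_default_width) := by unfold Pre_distribute_objects; infer_instance

def pvWitness_distribute_objects : (List (List (String × String))) × Int × String :=
  ([[("objectWidth", "col-6")], [("objectWidth", "col-6")], [("objectWidth", "col-6")]], 2, "col-4")

def Spec_distribute_objects (objects : List (List (String × String))) (max_objects : Int) (row_default_width : String) (out : List (List (List (String × String)))) : Prop := out = distribute_objects_alt objects max_objects row_default_width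
instance (objects : List (List (String × String))) (max_objects : Int) (row_default_width : String) (out : List (List (List (String × String)))) : Decidable (Spec_distribute_objects objects max_objects row_default_width out) := by unfold Spec_distribute_objects; infer_instance

-- ===== CLAIM (what is proved, stated in full; the proofs are below) =====
def Claim_equal_distribute_objects : Prop := ∀ (objects : List (List (String × String))) (max_objects : Int) (row_default_width : String), Dom_distribute_objects objects max_objects row_default_width → Pre_distribute_objects objects max_objects row_default_width → Spec_distribute_objects objects max_objects row_default_width (distribute_objects objects max_objects row_default_width)

-- ===== LEMMAS AND PROOFS =====

-- widths: A's two-helper parse equals B's single _width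
lemma pv_width_eq (c : String) : pvWidthB c = parse_col_width c := by
  unfold pvWidthB parse_col_width
  by_cases h1 : c = ""
  · rw [if_pos h1, if_pos h1]
  · rw [if_neg h1, if_neg h1]
    by_cases h2 : PySem.Str.startswith c "w-" = true
    · rw [if_pos h2, if_pos h2]
    · rw [if_neg h2, if_neg h2]

lemma pv_eff_width (o : List (String × String)) (rdw : String) :
    pvWidthB (if PySem.Dict.getD (PySem.Dict.mk o) "objectWidth" "" = "" then rdw
              else PySem.Dict.getD (PySem.Dict.mk o) "objectWidth" "") = effective_obj_width o rdw := by
  unfold effective_obj_width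
  by_cases h : PySem.Dict.getD (PySem.Dict.mk o) "objectWidth" "" = "" <;>
    simp [h, pv_width_eq]

-- proof-side: boundaries emitted while scanning ONE object, and the new line_used
def pvEmit1 (n w i used : Int) : List Int × Int :=
  if 0 < used ∧ pvLineTotal < used + w then
    (if pvLineTotal ≤ w then ((if i + 1 < n then [i, i + 1] else [i]), 0) else ([i], w))
  else
    (if pvLineTotal ≤ used + w then ((if i + 1 < n then [i + 1] else []), 0) else ([], used + w))

-- proof-side: the whole emission stream and the final line_used
def pvEU (n : Int) (rdw : String) : List (List (String × String)) → Int → Int → List Int × Int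
  | [], _, used => ([], used)
  | o :: os, i, used =>
    ((pvEmit1 n (effective_obj_width o rdw) i used).1
        ++ (pvEU n rdw os (i + 1) (pvEmit1 n (effective_obj_width o rdw) i used).2).1,
     (pvEU n rdw os (i + 1) (pvEmit1 n (effective_obj_width o rdw) i used).2).2)

lemma pv_stepBnd_eq (n : Int) (rdw : String) (bnd : List Int) (used i : Int) (o : List (String × String)) :
    pvStepBnd n rdw (bnd, used) (i, o)
      = (bnd ++ (pvEmit1 n (effective_obj_width o rdw) i used).1,
         (pvEmit1 n (effective_obj_width o rdw) i used).2) := by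
  simp only [pvStepBnd, pvEmit1]
  by_cases hC1 : 0 < used ∧ pvLineTotal < used + effective_obj_width o rdw <;>
  by_cases hC2 : pvLineTotal ≤ effective_obj_width o rdw <;>
  by_cases hC2' : pvLineTotal ≤ used + effective_obj_width o rdw <;>
  by_cases hC3 : i + 1 < n <;>
  simp [hC1, hC2, hC2', hC3]

lemma pv_stepB_eq (objects : List (List (String × String))) (m : Int) (rdw : String)
    (st : List (List (List (String × String))) × Int × Int) (used i : Int) (o : List (String × String)) :
    pvStepB objects m rdw (st, used) (i, o)
      = ((pvEmit1 (PySem.List.len objects) (effective_obj_width o rdw) i used).1.foldl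
           (fun s b => pvAdvance objects m (objects.length + 1) s b) st,
         (pvEmit1 (PySem.List.len objects) (effective_obj_width o rdw) i used).2) := by
  simp only [pvStepB, pvEmit1]
  rw [pv_eff_width]
  by_cases hC1 : 0 < used ∧ pvLineTotal < used + effective_obj_width o rdw <;>
  by_cases hC2 : pvLineTotal ≤ effective_obj_width o rdw <;>
  by_cases hC2' : pvLineTotal ≤ used + effective_obj_width o rdw <;>
  by_cases hC3 : i + 1 < (objects.length : Int) <;>
  simp [hC1, hC2, hC2', hC3]

-- A's boundary fold appends exactly the emission stream
lemma pv_foldA (n : Int) (rdw : String) :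
    ∀ (os : List (List (String × String))) (i : Int) (bnd : List Int) (used : Int),
    (PySem.List.enumerate os i).foldl (pvStepBnd n rdw) (bnd, used)
      = (bnd ++ (pvEU n rdw os i used).1, (pvEU n rdw os i used).2) := by
  intro os
  induction os with
  | nil => intro i bnd used; simp [PySem.List.enumerate_nil, pvEU]
  | cons o os ih =>
    intro i bnd used
    rw [PySem.List.enumerate_cons, List.foldl_cons, pv_stepBnd_eq, ih]
    simp [pvEU, List.append_assoc]

-- B's fused fold = folding the emission stream through _advance
lemma pv_foldB (objects : List (List (String × String))) (m : Int) (rdw : String) :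
    ∀ (os : List (List (String × String))) (i : Int) (st : List (List (List (String × String))) × Int × Int) (used : Int),
    (PySem.List.enumerate os i).foldl (pvStepB objects m rdw) (st, used)
      = ((pvEU (PySem.List.len objects) rdw os i used).1.foldl
           (fun s b => pvAdvance objects m (objects.length + 1) s b) st,
         (pvEU (PySem.List.len objects) rdw os i used).2) := by
  intro os
  induction os with
  | nil => intro i st used; simp [PySem.List.enumerate_nil, pvEU]
  | cons o os ih =>
    intro i st used
    rw [PySem.List.enumerate_cons, List.foldl_cons, pv_stepB_eq, ih]
    simp [pvEU, List.foldl_append]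

-- one object's emissions: candidates, guard on i+1, and shape facts
lemma pv_emit1_facts (n w i used : Int) :
    (∀ b ∈ (pvEmit1 n w i used).1, ((b = i ∧ 0 < used) ∨ (b = i + 1 ∧ i + 1 < n))
        ∧ (0 < (pvEmit1 n w i used).2 → b = i))
    ∧ ((pvEmit1 n w i used).1).Pairwise (· < ·) := by
  unfold pvEmit1
  by_cases hC1 : 0 < used ∧ pvLineTotal < used + w <;>
  by_cases hC2 : pvLineTotal ≤ w <;>
  by_cases hC2' : pvLineTotal ≤ used + w <;>
  by_cases hC3 : i + 1 < n <;>
  simp [hC1, hC2, hC2', hC3]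

-- emitted boundaries are ≥ i (≥ i+1 when the line is empty) and strictly increasing
lemma pv_EU_lb_sorted (n : Int) (rdw : String) :
    ∀ (os : List (List (String × String))) (i used : Int),
    (∀ b ∈ (pvEU n rdw os i used).1, (if 0 < used then i else i + 1) ≤ b)
      ∧ ((pvEU n rdw os i used).1).Pairwise (· < ·) := by
  intro os
  induction os with
  | nil => intro i used; simp [pvEU]
  | cons o os ih =>
    intro i used
    have IH := ih (i + 1) (pvEmit1 n (effective_obj_width o rdw) i used).2
    have F := pv_emit1_facts n (effective_obj_width o rdw) i used
    simp only [pvEU]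
    constructor
    · intro b hb
      rcases List.mem_append.mp hb with h | h
      · rcases (F.1 b h).1 with ⟨rfl, hu⟩ | ⟨rfl, _⟩ <;> split_ifs <;> omega
      · have := IH.1 b h
        split_ifs at this ⊢ <;> omega
    · rw [List.pairwise_append]
      refine ⟨F.2, IH.2, ?_⟩
      intro a ha b hb
      have h1 := F.1 a ha
      have h2 := IH.1 b hb
      by_cases he : 0 < (pvEmit1 n (effective_obj_width o rdw) i used).2
      · have := h1.2 he
        rw [if_pos he] at h2
        omega
      · rw [if_neg he] at h2
        rcases h1.1 with ⟨rfl, _⟩ | ⟨rfl, _⟩ <;> omega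

-- emitted boundaries stay below n
lemma pv_EU_ub (n : Int) (rdw : String) :
    ∀ (os : List (List (String × String))) (i used : Int), i + os.length = n →
    ∀ b ∈ (pvEU n rdw os i used).1, b ≤ n - 1 := by
  intro os
  induction os with
  | nil => intro i used _; simp [pvEU]
  | cons o os ih =>
    intro i used hlen b hb
    have hlen' : i + 1 + (os.length : Int) = n := by
      simp only [List.length_cons] at hlen; push_cast at hlen ⊢; omega
    simp only [pvEU] at hb
    rcases List.mem_append.mp hb with h | h
    · have hi : i ≤ n - 1 := by
        have h0 : (0:Int) ≤ (os.length : Int) := by positivity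
        omega
      rcases (pv_emit1_facts n (effective_obj_width o rdw) i used).1 b h |>.1 with ⟨rfl, _⟩ | ⟨rfl, hg⟩ <;> omega
    · exact ih (i + 1) _ hlen' b h

-- scanBack facts
lemma pv_scanBack_self_or_gt (bs : List Int) (start : Int) :
    ∀ k, pvScanBack bs start k = start ∨ start < pvScanBack bs start k := by
  intro k
  induction k with
  | zero => left; rfl
  | succ k ih =>
    simp only [pvScanBack]
    cases h : bs[k]? with
    | none => exact ih
    | some c =>
      by_cases hc : start < c
      · right; simp [hc]
      · simpa [hc] using ih

lemma pv_scanBack_hit (bs : List Int) (start : Int) (k : Nat) (c : Int)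
    (h : bs[k]? = some c) (hc : start < c) : pvScanBack bs start (k+1) = c := by
  simp [pvScanBack, h, hc]

lemma pv_scanBack_miss (bs : List Int) (start : Int) :
    ∀ k, (∀ j, j < k → ∀ c, bs[j]? = some c → c ≤ start) → pvScanBack bs start k = start := by
  intro k
  induction k with
  | zero => intro _; rfl
  | succ k ih =>
    intro hall
    simp only [pvScanBack]
    cases h : bs[k]? with
    | none => exact ih (fun j hj c hc => hall j (by omega) c hc)
    | some c =>
      have : c ≤ start := hall k (by omega) c h
      simp only [show ¬ start < c by omega, if_false]
      exact ih (fun j hj c hc => hall j (by omega) c hc)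

lemma pv_pairwise_last_max (l : List Int) (hl : l.Pairwise (· < ·)) (h : l ≠ []) :
    ∀ x ∈ l, x ≤ l.getLast h := by
  induction l with
  | nil => simp at h
  | cons a t ih =>
    intro x hx
    rcases List.mem_cons.mp hx with rfl | hxt
    · cases t with
      | nil => simp [List.getLast]
      | cons b t' =>
        have : x < (b :: t').getLast (by simp) :=
          (List.pairwise_cons.mp hl).1 _ (List.getLast_mem _)
        rw [List.getLast_cons (by simp)]
        omega
    · have ht : t ≠ [] := by rintro rfl; simp at hxt
      have := ih (List.pairwise_cons.mp hl).2 ht x hxt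
      rw [List.getLast_cons ht]
      exact this

-- the bisect_right + backward-scan split equals the streamed candidate rule
lemma pv_split_char (bs done todo : List Int) (start m cand : Int)
    (hbs : bs = done ++ todo) (hsort : bs.Pairwise (· < ·))
    (hne : done ≠ []) (hlast : done.getLast hne = cand)
    (htodo : ∀ x ∈ todo, start + m < x) (hcand : cand ≤ start + m) :
    (if pvScanBack bs start (PySem.List.bisectRight bs (start + m)) = start then start + m
     else pvScanBack bs start (PySem.List.bisectRight bs (start + m)))
      = if start < cand then cand else start + m := by
  subst hbs
  have hsort' : (done ++ todo).Pairwise (· ≤ ·) := hsort.imp le_of_lt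
  have hdone_pw : done.Pairwise (· < ·) := (List.pairwise_append.mp hsort).1
  have hdone_le : ∀ x ∈ done, x ≤ cand := by
    intro x hx; exact hlast ▸ pv_pairwise_last_max done hdone_pw hne x hx
  have hlen : (done ++ todo).length = done.length + todo.length := by simp
  obtain ⟨hb1, hb2, hb3⟩ := PySem.List.bisectRight_spec (done ++ todo) (start + m) hsort'
  have hdl_pos : 0 < done.length := List.length_pos_iff.mpr hne
  have hidx : PySem.List.bisectRight (done ++ todo) (start + m) = done.length := by
    by_contra hne'
    rcases Nat.lt_or_ge (PySem.List.bisectRight (done ++ todo) (start + m)) done.length with hlt | hge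
    · have hlen2 : PySem.List.bisectRight (done ++ todo) (start + m) < (done ++ todo).length := by omega
      have h3 := hb3 _ hlen2 (le_refl _)
      have hmem : (done ++ todo)[PySem.List.bisectRight (done ++ todo) (start + m)]'hlen2 ∈ done := by
        rw [List.getElem_append_left hlt]
        exact List.getElem_mem _
      have := hdone_le _ hmem
      omega
    · have hgt : done.length < PySem.List.bisectRight (done ++ todo) (start + m) := by omega
      have hlen2 : done.length < (done ++ todo).length := by omega
      have h2 := hb2 done.length hlen2 hgt
      have hmem : (done ++ todo)[done.length]'hlen2 ∈ todo := by
        rw [List.getElem_append_right (le_refl done.length)]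
        exact List.getElem_mem _
      have := htodo _ hmem
      omega
  rw [hidx]
  have hget : (done ++ todo)[done.length - 1]? = some cand := by
    rw [List.getElem?_append_left (by omega)]
    rw [List.getElem?_eq_getElem (by omega)]
    rw [← hlast, List.getLast_eq_getElem]
  by_cases hsc : start < cand
  · rw [show done.length = (done.length - 1) + 1 by omega,
        pv_scanBack_hit (done ++ todo) start (done.length - 1) cand hget hsc]
    rw [if_neg (by omega), if_pos hsc]
  · have hmiss : ∀ j, j < done.length → ∀ c, (done ++ todo)[j]? = some c → c ≤ start := by
      intro j hj c hc
      rw [List.getElem?_append_left (by omega), List.getElem?_eq_getElem (by omega)] at hc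
      have hcm : c ∈ done := by
        rw [← Option.some_inj.mp hc]
        exact List.getElem_mem _
      have := hdone_le _ hcm
      omega
    rw [pv_scanBack_miss (done ++ todo) start done.length hmiss]
    rw [if_pos rfl, if_neg hsc]

-- fuel irrelevance for A's while-loop
lemma pv_loopA_congr (objects : List (List (String × String))) (m : Int) (bs : List Int)
    (hm : 1 ≤ m) :
    ∀ f1 f2 (start : Int), (PySem.List.len objects - start).toNat < f1 →
      (PySem.List.len objects - start).toNat < f2 →
      pvLoopA objects m bs f1 start = pvLoopA objects m bs f2 start := by
  intro f1
  induction f1 with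
  | zero => intro f2 start h1 _; omega
  | succ f1 ih =>
    intro f2 start h1 h2
    cases f2 with
    | zero => omega
    | succ f2 =>
      simp only [pvLoopA]
      by_cases hlt : start < PySem.List.len objects
      · simp only [hlt, if_true]
        by_cases hle : PySem.List.len objects - start ≤ m
        · simp only [hle, if_true]
        · simp only [hle, if_false]
          congr 1
          have hsplit : start < (if pvScanBack bs start (PySem.List.bisectRight bs (start + m)) = start
              then start + m else pvScanBack bs start (PySem.List.bisectRight bs (start + m))) := by
            rcases pv_scanBack_self_or_gt bs start (PySem.List.bisectRight bs (start + m)) with h | h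
            · rw [if_pos h]; omega
            · by_cases he : pvScanBack bs start (PySem.List.bisectRight bs (start + m)) = start
              · rw [if_pos he]; omega
              · rw [if_neg he]; exact h
          apply ih
          · simp only [PySem.List.len_eq] at *; omega
          · simp only [PySem.List.len_eq] at *; omega
      · simp only [hlt, if_false]

-- one _advance call simulates the forced/boundary flushes of A's loop
lemma pv_adv_main (objects : List (List (String × String))) (m : Int) (bs done rest : List Int)
    (cand b : Int) (hm : 1 ≤ m)
    (hbs : bs = done ++ b :: rest) (hsort : bs.Pairwise (· < ·))
    (hne : done ≠ []) (hlast : done.getLast hne = cand)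
    (hb : b ≤ PySem.List.len objects - 1) :
    ∀ fuel (pages : List (List (List (String × String)))) (start : Int),
    0 ≤ start → start < PySem.List.len objects → cand ≤ start + m →
    (b - start).toNat < fuel →
    ∃ pages' start',
      pvAdvance objects m fuel (pages, start, cand) b = (pages', start', b)
      ∧ 0 ≤ start' ∧ start' < PySem.List.len objects ∧ b ≤ start' + m
      ∧ pages ++ pvLoopA objects m bs ((PySem.List.len objects - start).toNat + 1) start
        = pages' ++ pvLoopA objects m bs ((PySem.List.len objects - start').toNat + 1) start' := by
  have htodo : ∀ x ∈ b :: rest, b ≤ x := by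
    intro x hx
    rcases List.mem_cons.mp hx with rfl | hxr
    · exact le_refl _
    · have hpw : (b :: rest).Pairwise (· < ·) := (List.pairwise_append.mp (hbs ▸ hsort)).2.1
      exact le_of_lt ((List.pairwise_cons.mp hpw).1 _ hxr)
  intro fuel
  induction fuel with
  | zero => intro pages start _ _ _ hf; omega
  | succ fuel ih =>
    intro pages start h0 hsn hcm hf
    simp only [pvAdvance]
    by_cases hflush : start + m < b
    · simp only [hflush, if_true]
      have hcut_gt : start < (if start < cand then cand else start + m) := by split_ifs <;> omega
      have hcut_le : (if start < cand then cand else start + m) ≤ start + m := by split_ifs <;> omega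
      have hchar := pv_split_char bs done (b :: rest) start m cand hbs hsort hne hlast
        (fun x hx => lt_of_lt_of_le hflush (htodo x hx)) (by omega)
      have hAstep : pvLoopA objects m bs ((PySem.List.len objects - start).toNat + 1) start
          = PySem.List.slice objects (some start) (some (if start < cand then cand else start + m))
            :: pvLoopA objects m bs
                ((PySem.List.len objects - (if start < cand then cand else start + m)).toNat + 1)
                (if start < cand then cand else start + m) := by
        conv_lhs => rw [pvLoopA]
        rw [if_pos hsn, if_neg (by omega : ¬ PySem.List.len objects - start ≤ m)]
        simp only [letFun]
        rw [hchar]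
        congr 1
        apply pv_loopA_congr objects m bs hm
        · simp only [PySem.List.len_eq] at *; omega
        · simp only [PySem.List.len_eq] at *; omega
      obtain ⟨pages', start', heq, h0', hsn', hbm', hchain⟩ :=
        ih (pages ++ [PySem.List.slice objects (some start) (some (if start < cand then cand else start + m))])
          (if start < cand then cand else start + m)
          (by omega) (by omega) (by omega) (by omega)
      refine ⟨pages', start', heq, h0', hsn', hbm', ?_⟩
      rw [hAstep, ← hchain]
      simp
    · simp only [hflush, if_false]
      exact ⟨pages, start, rfl, h0, hsn, by omega, rfl⟩

-- the trailing while-loop finishes exactly like A's loop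
lemma pv_fin_main (objects : List (List (String × String))) (m : Int) (bs : List Int)
    (cand : Int) (hm : 1 ≤ m) (hsort : bs.Pairwise (· < ·))
    (hne : bs ≠ []) (hlast : bs.getLast hne = cand) :
    ∀ fuel (pages : List (List (List (String × String)))) (start : Int),
    0 ≤ start → start < PySem.List.len objects → cand ≤ start + m →
    (PySem.List.len objects - start).toNat < fuel →
    (pvFinish objects m fuel (pages, start, cand)).1
        ++ [PySem.List.slice objects (some (pvFinish objects m fuel (pages, start, cand)).2) none]
      = pages ++ pvLoopA objects m bs ((PySem.List.len objects - start).toNat + 1) start := by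
  intro fuel
  induction fuel with
  | zero => intro pages start _ _ _ hf; omega
  | succ fuel ih =>
    intro pages start h0 hsn hcm hf
    simp only [pvFinish]
    by_cases hfl : m < PySem.List.len objects - start
    · simp only [hfl, if_true]
      have hcut_gt : start < (if start < cand then cand else start + m) := by split_ifs <;> omega
      have hcut_le : (if start < cand then cand else start + m) ≤ start + m := by split_ifs <;> omega
      have hchar := pv_split_char bs bs [] start m cand (by simp) hsort hne hlast
        (by intro x hx; simp at hx) (by omega)
      have hAstep : pvLoopA objects m bs ((PySem.List.len objects - start).toNat + 1) start
          = PySem.List.slice objects (some start) (some (if start < cand then cand else start + m))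
            :: pvLoopA objects m bs
                ((PySem.List.len objects - (if start < cand then cand else start + m)).toNat + 1)
                (if start < cand then cand else start + m) := by
        conv_lhs => rw [pvLoopA]
        rw [if_pos hsn, if_neg (by omega : ¬ PySem.List.len objects - start ≤ m)]
        simp only [letFun]
        rw [hchar]
        congr 1
        apply pv_loopA_congr objects m bs hm
        · simp only [PySem.List.len_eq] at *; omega
        · simp only [PySem.List.len_eq] at *; omega
      rw [hAstep]
      rw [ih (pages ++ [PySem.List.slice objects (some start) (some (if start < cand then cand else start + m))])
            (if start < cand then cand else start + m)
            (by omega) (by omega) (by omega) (by omega)]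
      simp
    · simp only [hfl, if_false]
      conv_rhs => rw [pvLoopA]
      rw [if_pos hsn, if_pos (by omega : PySem.List.len objects - start ≤ m)]

-- main simulation: pushing the remaining boundaries then finishing = A's loop
lemma pv_main_sim (objects : List (List (String × String))) (m : Int) (bs : List Int)
    (hm : 1 ≤ m) (hsort : bs.Pairwise (· < ·))
    (hbnd : ∀ b ∈ bs, 0 ≤ b ∧ b ≤ PySem.List.len objects - 1) :
    ∀ (todo done : List Int) (pages : List (List (List (String × String)))) (start cand : Int)
      (hne : done ≠ []),
    bs = done ++ todo → done.getLast hne = cand →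
    0 ≤ start → start < PySem.List.len objects → cand ≤ start + m →
    ((pvFinish objects m (objects.length + 1)
        (todo.foldl (fun s b => pvAdvance objects m (objects.length + 1) s b) (pages, start, cand))).1
      ++ [PySem.List.slice objects
            (some (pvFinish objects m (objects.length + 1)
              (todo.foldl (fun s b => pvAdvance objects m (objects.length + 1) s b) (pages, start, cand))).2) none])
      = pages ++ pvLoopA objects m bs ((PySem.List.len objects - start).toNat + 1) start := by
  intro todo
  induction todo with
  | nil =>
    intro done pages start cand hne hbs hlast h0 hsn hcm
    have hbs' : bs = done := by simpa using hbs
    subst hbs'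
    simp only [List.foldl_nil]
    exact pv_fin_main objects m bs cand hm hsort hne hlast (objects.length + 1) pages start h0 hsn hcm
      (by simp only [PySem.List.len_eq] at *; omega)
  | cons b rest ih =>
    intro done pages start cand hne hbs hlast h0 hsn hcm
    have hbmem : b ∈ bs := by rw [hbs]; exact List.mem_append_right _ List.mem_cons_self
    obtain ⟨hb0, hbub⟩ := hbnd b hbmem
    rw [List.foldl_cons]
    obtain ⟨pages', start', heq, h0', hsn', hbm', hchain⟩ :=
      pv_adv_main objects m bs done rest cand b hm hbs hsort hne hlast hbub
        (objects.length + 1) pages start h0 hsn hcm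
        (by simp only [PySem.List.len_eq] at *; omega)
    rw [heq]
    have hne2 : done ++ [b] ≠ [] := by simp
    have hlast2 : (done ++ [b]).getLast hne2 = b := by
      have h9 : (done ++ [b]).getLast? = some b := by simp
      have h8 := List.getLast?_eq_some_getLast hne2
      exact Option.some_inj.mp (h8.symm.trans h9)
    rw [ih (done ++ [b]) pages' start' b hne2 (by rw [hbs]; simp) hlast2 h0' hsn' hbm']
    exact hchain.symm

-- ===== VERDICT (by name: the statement is the Claim_ definition above) =====
theorem distribute_objects_spec : Claim_equal_distribute_objects := by
  intro objects m rdw hdom hpre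
  unfold Spec_distribute_objects distribute_objects distribute_objects_alt
  by_cases hnm : PySem.List.len objects ≤ m
  · rw [if_pos hnm, if_pos hnm]
  · have hm : 1 ≤ m := hpre.resolve_left hnm
    rw [if_neg hnm, if_neg hnm]
    show pvLoopA objects m (compute_line_boundaries objects rdw) (objects.length + 1) 0 =
      (pvFinish objects m (objects.length + 1)
        ((PySem.List.enumerate objects 0).foldl (pvStepB objects m rdw) (([], 0, 0), 0)).1).1
      ++ [PySem.List.slice objects
            (some (pvFinish objects m (objects.length + 1)
              ((PySem.List.enumerate objects 0).foldl (pvStepB objects m rdw) (([], 0, 0), 0)).1).2) none]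
    rw [pv_foldB objects m rdw objects 0 ([], 0, 0) 0]
    have hbsE : compute_line_boundaries objects rdw
        = [0] ++ (pvEU (PySem.List.len objects) rdw objects 0 0).1 := by
      unfold compute_line_boundaries
      rw [pv_foldA]
    obtain ⟨hlb, hpw⟩ := pv_EU_lb_sorted (PySem.List.len objects) rdw objects 0 0
    have hub := pv_EU_ub (PySem.List.len objects) rdw objects 0 0 (by simp [PySem.List.len_eq])
    have hn2 : 2 ≤ PySem.List.len objects := by omega
    have hsort : (compute_line_boundaries objects rdw).Pairwise (· < ·) := by
      rw [hbsE]
      simp only [List.singleton_append]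
      exact List.pairwise_cons.mpr ⟨fun b hb => by have := hlb b hb; simp at this; omega, hpw⟩
    have hbnd : ∀ b ∈ compute_line_boundaries objects rdw, 0 ≤ b ∧ b ≤ PySem.List.len objects - 1 := by
      intro b hb
      rw [hbsE] at hb
      simp only [List.singleton_append, List.mem_cons] at hb
      rcases hb with rfl | hb
      · exact ⟨le_refl _, by omega⟩
      · have h1 := hlb b hb
        simp at h1
        exact ⟨by omega, hub b hb⟩
    have key := pv_main_sim objects m (compute_line_boundaries objects rdw) hm hsort hbnd
      (pvEU (PySem.List.len objects) rdw objects 0 0).1 [0] [] 0 0 (by simp)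
      (by rw [hbsE]) rfl (le_refl 0) (by omega) (by omega)
    have hfn : ((PySem.List.len objects - 0).toNat + 1) = objects.length + 1 := by
      simp [PySem.List.len_eq]
    rw [hfn] at key
    simpa using key.symm
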